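-- pv_equiv track=rewrite | github.com/kyungjun-kim/Problem_Solving | Programmers/Level_1/이상한 문자 만들기.py | solution
-- ===== SOURCE A (Python) =====
-- def solution(s):
--     result = []
--     for s in s.split(" ") :
--         ss = ""
--         for i in range(len(s)) :
--             if i%2 == 0 :
--                 ss += s[i].upper()
--             else :
--                 ss += s[i]
--         result.append(ss)
--     return ' '.join(result)
-- ===== SOURCE B (Python) =====
-- def solution(s):
--     out = []
--     idx = 0
--     for ch in s:
--         if ch == ' ':
--             out.append(' ')
--             idx = 0
--         elif idx % 2 == 0:
--             out.append(ch.upper())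
--             idx += 1
--         else:
--             out.append(ch)
--             idx += 1
--     return ''.join(out)
-- ===== Notes on version B (the rewrite author's own statement) =====
-- stated objective: simpler
-- what changed: Replaces the split-into-words plus inner range(len) indexed loop plus final join by a single flat pass over the string with an integer position counter that resets at every word boundary.
import Mathlib
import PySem

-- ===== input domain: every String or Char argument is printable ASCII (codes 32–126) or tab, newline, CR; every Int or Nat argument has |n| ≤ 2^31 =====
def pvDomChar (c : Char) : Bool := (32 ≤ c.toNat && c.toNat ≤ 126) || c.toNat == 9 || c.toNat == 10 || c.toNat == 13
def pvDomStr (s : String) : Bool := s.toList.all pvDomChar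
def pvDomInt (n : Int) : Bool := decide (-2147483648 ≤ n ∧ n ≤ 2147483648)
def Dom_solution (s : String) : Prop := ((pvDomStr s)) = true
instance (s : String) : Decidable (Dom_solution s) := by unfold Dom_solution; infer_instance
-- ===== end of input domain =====

-- B replaces A's split(" ") + inner indexed loop + join by one flat pass with a
-- position counter reset on spaces; same return value, no speed claim.

-- ===== PORT A =====
-- literal port of A: split on " ", per word loop i in range(len(word)) building ss,
-- collect the words, join with " ".  (s[i] is in range throughout the loop, so the
-- pyGetD default is never used.)
def solution (s : String) : String :=
  let result := (PySem.Chars.splitOn s.toList [' ']).foldl (fun result w =>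
    let ss := (PySem.List.pyRange 0 (w.length : Int) 1).foldl (fun ss i =>
      if PySem.Int.mod i 2 == 0 then
        ss ++ [PySem.Chars.upperChar (PySem.List.pyGetD w i ' ')]
      else
        ss ++ [PySem.List.pyGetD w i ' ']) ([] : List Char)
    result ++ [ss]) ([] : List (List Char))
  String.ofList (PySem.Chars.join [' '] result)

-- ===== PORT B =====
-- literal port of Source B: one fold over the characters carrying (out, idx).
def solution_alt (s : String) : String :=
  let st := s.toList.foldl (fun (st : List Char × Int) ch =>
    if ch == ' ' then (st.1 ++ [' '], 0)
    else if PySem.Int.mod st.2 2 == 0 then (st.1 ++ [PySem.Chars.upperChar ch], st.2 + 1)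
    else (st.1 ++ [ch], st.2 + 1)) (([] : List Char), (0 : Int))
  String.ofList st.1

-- ===== PRECONDITION & SPEC =====
def Spec_solution (s : String) (out : String) : Prop := out = solution_alt s
instance (s : String) (out : String) : Decidable (Spec_solution s out) := by unfold Spec_solution; infer_instance

-- ===== CLAIM (what is proved, stated in full; the proofs are below) =====
def Claim_equal_solution : Prop := ∀ (s : String), Dom_solution s → Spec_solution s (solution s)

-- ===== LEMMAS AND PROOFS =====

-- transform of one word starting at position k (what A does to a word, index-shifted)
def twChars (k : Nat) : List Char → List Char
  | [] => []
  | c :: cs => (if k % 2 == 0 then PySem.Chars.upperChar c else c) :: twChars (k + 1) cs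

-- transform of the whole string with position k inside the current word (what B computes)
def swChars (k : Nat) : List Char → List Char
  | [] => []
  | c :: cs =>
    if c == ' ' then ' ' :: swChars 0 cs
    else (if k % 2 == 0 then PySem.Chars.upperChar c else c) :: swChars (k + 1) cs

-- PySem's split on a single space is Mathlib's List.splitOn ' '
lemma splitOn_go_space (fuel : Nat) : ∀ (l cur : List Char) (acc : List (List Char)),
    l.length < fuel →
    PySem.Chars.splitOn.go [' '] fuel l cur acc
      = acc.reverse ++ (l.splitOn ' ').modifyHead (cur.reverse ++ ·) := by
  induction fuel with
  | zero => intro l cur acc h; omega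
  | succ fuel ih =>
    intro l cur acc h
    rw [PySem.Chars.splitOn.go.eq_def]
    cases l with
    | nil =>
      simp [List.splitOn]
    | cons c rest =>
      by_cases hc : c = ' '
      · subst hc
        simp only [List.isPrefixOf, BEq.rfl, Bool.true_and, if_pos]
        rw [ih _ _ _ (by simpa using Nat.lt_of_succ_lt_succ h)]
        simp only [List.splitOn, List.splitOnP_cons, BEq.rfl, if_pos, List.reverse_cons,
          List.reverse_nil, List.nil_append, List.modifyHead_cons, List.append_nil,
          List.append_assoc, List.singleton_append]
        cases hX : List.splitOnP (fun x => x == ' ') rest <;> simp [List.modifyHead, hX]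
      · have hpre : ([' '] : List Char).isPrefixOf (c :: rest) = false := by
          simp [List.isPrefixOf]; exact fun h' => hc h'.symm
        simp only [hpre, Bool.false_eq_true, if_false]
        rw [ih _ _ _ (by simpa using Nat.lt_of_succ_lt_succ h)]
        have hsplit : (c :: rest).splitOn ' ' = (rest.splitOn ' ').modifyHead (List.cons c) := by
          simp [List.splitOn, List.splitOnP_cons, hc]
        rw [hsplit]
        obtain ⟨w, ws, hw⟩ := List.exists_cons_of_ne_nil (List.splitOnP_ne_nil (· == ' ') rest)
        simp [List.splitOn] at hw ⊢
        simp [hw, List.modifyHead]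

lemma splitOn_space (cs : List Char) :
    PySem.Chars.splitOn cs [' '] = cs.splitOn ' ' := by
  have h := splitOn_go_space (cs.length + 1) cs [] [] (by omega)
  rw [PySem.Chars.splitOn, h]
  obtain ⟨w, ws, hw⟩ := List.exists_cons_of_ne_nil (List.splitOnP_ne_nil (· == ' ') cs)
  simp [List.splitOn] at hw ⊢
  simp [hw, List.modifyHead]

-- A's inner loop on a word is twChars 0
lemma inner_map (w : List Char) (k : Nat) :
    (List.range w.length).map
        (fun i => if (k + i) % 2 == 0 then PySem.Chars.upperChar (w.getD i ' ') else w.getD i ' ')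
      = twChars k w := by
  induction w generalizing k with
  | nil => simp [twChars]
  | cons c cs ih =>
    rw [List.length_cons, List.range_succ_eq_map]
    simp only [List.map_cons, List.map_map]
    have : ((fun i => if (k + i) % 2 == 0 then PySem.Chars.upperChar ((c :: cs).getD i ' ')
              else (c :: cs).getD i ' ') ∘ Nat.succ)
        = (fun i => if ((k + 1) + i) % 2 == 0 then PySem.Chars.upperChar (cs.getD i ' ')
              else cs.getD i ' ') := by
      funext i
      have : k + (i + 1) = (k + 1) + i := by omega
      simp [Function.comp, this]
    rw [this, ih]
    simp [twChars]

lemma inner_eq (w : List Char) :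
    (PySem.List.pyRange 0 (w.length : Int) 1).foldl (fun ss i =>
      if PySem.Int.mod i 2 == 0 then
        ss ++ [PySem.Chars.upperChar (PySem.List.pyGetD w i ' ')]
      else
        ss ++ [PySem.List.pyGetD w i ' ']) ([] : List Char) = twChars 0 w := by
  have hstep : (fun (ss : List Char) (i : Int) =>
      if PySem.Int.mod i 2 == 0 then
        ss ++ [PySem.Chars.upperChar (PySem.List.pyGetD w i ' ')]
      else
        ss ++ [PySem.List.pyGetD w i ' '])
    = (fun ss i => ss ++ [if PySem.Int.mod i 2 == 0
        then PySem.Chars.upperChar (PySem.List.pyGetD w i ' ') else PySem.List.pyGetD w i ' ']) := by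
    funext ss i; split <;> rfl
  rw [hstep, PySem.List.foldl_append_singleton_eq_map, PySem.List.pyRange_zero_natCast,
    List.map_map]
  rw [← inner_map w 0]
  apply congrArg
  apply List.map_congr_left
  intro i _
  have hm : PySem.Int.mod (i : Int) 2 = ((i % 2 : Nat) : Int) := by
    exact_mod_cast PySem.Int.mod_natCast i 2
  simp only [Function.comp_apply, hm, PySem.List.pyGetD_natCast, Nat.zero_add]
  by_cases hp : i % 2 = 0 <;> simp [hp] <;> try omega

-- join of the per-word transforms is B's flat scan
lemma join_cons_head (sep : List Char) (a : Char) (x : List Char) (rest : List (List Char)) :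
    PySem.Chars.join sep ((a :: x) :: rest) = a :: PySem.Chars.join sep (x :: rest) := by
  cases rest with
  | nil => simp [PySem.Chars.join_singleton]
  | cons q r => rw [PySem.Chars.join_cons_cons, PySem.Chars.join_cons_cons]; simp

lemma join_split (cs : List Char) (k : Nat) :
    ∀ w ws, cs.splitOn ' ' = w :: ws →
    PySem.Chars.join [' '] (twChars k w :: ws.map (twChars 0)) = swChars k cs := by
  induction cs generalizing k with
  | nil =>
    intro w ws h
    simp [List.splitOn, List.splitOnP_nil] at h
    obtain ⟨hw, hws⟩ := h
    subst hw; subst hws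
    simp [twChars, swChars, PySem.Chars.join_singleton]
  | cons c cs ih =>
    intro w ws h
    obtain ⟨w', ws', hw'⟩ := List.exists_cons_of_ne_nil (List.splitOnP_ne_nil (· == ' ') cs)
    have hcs : cs.splitOn ' ' = w' :: ws' := by simpa [List.splitOn] using hw'
    by_cases hc : c = ' '
    · subst hc
      have hsc : (' ' :: cs).splitOn ' ' = [] :: w' :: ws' := by
        simp [List.splitOn, List.splitOnP_cons, hw']
      rw [hsc] at h
      injection h with h1 h2
      subst h1; subst h2
      rw [List.map_cons]
      simp only [twChars]
      rw [PySem.Chars.join_cons_cons, ih 0 w' ws' hcs]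
      simp [swChars]
    · have hsc : (c :: cs).splitOn ' ' = (c :: w') :: ws' := by
        simp [List.splitOn, List.splitOnP_cons, hc, hw', List.modifyHead]
      rw [hsc] at h
      injection h with h1 h2
      subst h1; subst h2
      simp only [twChars]
      rw [join_cons_head, ih (k + 1) w' ws' hcs]
      simp [swChars, hc]

-- B's fold computes swChars
lemma foldB (cs : List Char) : ∀ (acc : List Char) (k : Nat),
    (cs.foldl (fun (st : List Char × Int) ch =>
      if ch == ' ' then (st.1 ++ [' '], 0)
      else if PySem.Int.mod st.2 2 == 0 then (st.1 ++ [PySem.Chars.upperChar ch], st.2 + 1)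
      else (st.1 ++ [ch], st.2 + 1)) (acc, (k : Int))).1 = acc ++ swChars k cs := by
  induction cs with
  | nil => intro acc k; simp [swChars]
  | cons c cs ih =>
    intro acc k
    simp only [List.foldl_cons]
    by_cases hc : c = ' '
    · subst hc
      rw [if_pos (by simp)]
      have h := ih (acc ++ [' ']) 0
      rw [Nat.cast_zero] at h
      rw [h]
      simp [swChars]
    · rw [if_neg (by simp [hc])]
      have hm : PySem.Int.mod (k : Int) 2 = ((k % 2 : Nat) : Int) := by
        exact_mod_cast PySem.Int.mod_natCast k 2
      rw [hm]
      have hk1 : ((k : Int) + 1) = (((k + 1 : Nat)) : Int) := by push_cast; ring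
      by_cases hpar : k % 2 = 0
      · rw [if_pos (by simp [hpar])]
        rw [hk1, ih]
        simp [swChars, hc, hpar]
      · rw [if_neg (by simp; omega)]
        rw [hk1, ih]
        simp [swChars, hc]
        omega

-- ===== VERDICT (by name: the statement is the Claim_ definition above) =====
theorem solution_spec : Claim_equal_solution := by
  intro s _
  unfold Spec_solution solution solution_alt
  obtain ⟨w, ws, hw⟩ := List.exists_cons_of_ne_nil
    (List.splitOnP_ne_nil (· == ' ') s.toList)
  have hsplit : s.toList.splitOn ' ' = w :: ws := by simpa [List.splitOn] using hw
  have hstep : (fun (result : List (List Char)) w =>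
      result ++ [(PySem.List.pyRange 0 (w.length : Int) 1).foldl (fun ss i =>
        if PySem.Int.mod i 2 == 0 then
          ss ++ [PySem.Chars.upperChar (PySem.List.pyGetD w i ' ')]
        else
          ss ++ [PySem.List.pyGetD w i ' ']) ([] : List Char)])
    = (fun result w => result ++ [twChars 0 w]) := by
    funext result w; rw [inner_eq]
  simp only [hstep, PySem.List.foldl_append_singleton_eq_map, List.nil_append]
  rw [splitOn_space, hsplit, List.map_cons]
  rw [join_split s.toList 0 w ws hsplit]
  have hB := foldB s.toList [] 0
  rw [Nat.cast_zero] at hB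
  rw [hB]
  simp
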